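-- pv_equiv track=rewrite | github.com/yiling-h/SI-Interaction | selectinf/Simulation/H1/nonlinear_H1_helpers.py | combine_nested_lists
-- ===== SOURCE A (Python) =====
-- def combine_nested_lists(L1):
--     combined_dict = {}
--
--     for outer_dict in L1:
--         for outer_key, inner_dict in outer_dict.items():
--             if outer_key not in combined_dict:
--                 combined_dict[outer_key] = {}
--             for inner_key, value_list in inner_dict.items():
--                 if inner_key not in combined_dict[outer_key]:
--                     combined_dict[outer_key][inner_key] = []
--                 combined_dict[outer_key][inner_key].extend(value_list)
--
--     return combined_dict
-- ===== SOURCE B (Python) =====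
-- def _merge(combine, a, b):
--     # Key-wise merge of two dicts: keys of a first (combined with b's value
--     # when the key is shared), then b's new keys in b's order.
--     out = {}
--     for k, va in a.items():
--         out[k] = combine(va, b[k]) if k in b else va
--     for k, vb in b.items():
--         if k not in a:
--             out[k] = vb
--     return out
--
--
-- def _merge_inner(a, b):
--     return _merge(lambda x, y: x + y, a, b)
--
--
-- def _merge_outer(a, b):
--     return _merge(_merge_inner, a, b)
--
--
-- def combine_nested_lists(L1):
--     out = {}
--     for d in L1:
--         out = _merge_outer(out, d)
--     return out
-- ===== Notes on version B (the rewrite author's own statement) =====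
-- stated objective: alternative
-- what changed: Replaces A's triple in-place update loop (ensure-key-then-extend into one shared mutable accumulator) by folding a pure binary key-wise dict merge over the list: merge(a,b) rebuilds a fresh dict from a's keys (concatenating on shared keys, recursing one level via the same generic helper) and then b's new keys, and combine_nested_lists is just a left fold of that merge starting from {}.
import Mathlib
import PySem

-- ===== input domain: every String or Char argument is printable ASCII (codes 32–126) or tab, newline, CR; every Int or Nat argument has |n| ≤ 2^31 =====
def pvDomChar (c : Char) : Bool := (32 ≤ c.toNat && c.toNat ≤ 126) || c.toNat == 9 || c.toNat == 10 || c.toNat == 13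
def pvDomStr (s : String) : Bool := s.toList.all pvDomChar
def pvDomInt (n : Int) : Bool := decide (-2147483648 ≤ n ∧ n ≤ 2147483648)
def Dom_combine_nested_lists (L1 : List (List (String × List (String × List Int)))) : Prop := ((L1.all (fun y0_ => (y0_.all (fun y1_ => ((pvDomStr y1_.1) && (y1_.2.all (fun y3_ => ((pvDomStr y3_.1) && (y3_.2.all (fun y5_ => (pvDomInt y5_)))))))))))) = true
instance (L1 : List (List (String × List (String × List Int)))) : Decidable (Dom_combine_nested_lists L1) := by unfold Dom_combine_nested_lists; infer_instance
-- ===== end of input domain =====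

-- B replaces A's triple in-place update loop by folding a pure binary key-wise dict merge
-- over the list (objective: alternative decomposition, not faster). Return values agree;
-- side effects differ only in that B's result may share list objects with the input where
-- A always builds fresh lists (neither mutates its input).

-- ===== PORT A =====
def combine_nested_lists (L1 : List (List (String × List (String × List Int)))) : List (String × List (String × List Int)) :=
  let combined : PySem.Dict String (PySem.Dict String (List Int)) :=
    L1.foldl (fun cd od =>
      od.foldl (fun cd p =>
        -- if outer_key not in combined_dict: combined_dict[outer_key] = {}
        let cd := if cd.contains p.1 then cd else cd.insert p.1 PySem.Dict.empty
        p.2.foldl (fun cd q =>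
          -- if inner_key not in combined_dict[outer_key]: … = [] ; then .extend(value_list)
          let inner := cd.getD p.1 PySem.Dict.empty
          let inner := if inner.contains q.1 then inner else inner.insert q.1 ([] : List Int)
          cd.insert p.1 (inner.modify q.1 [] (fun l => l ++ q.2))) cd) cd)
      PySem.Dict.empty
  combined.items.map (fun r => (r.1, r.2.items))

-- ===== PORT B =====
-- Source B's generic `_merge(combine, a, b)`: keys of a first (combined with b's value when
-- shared), then b's new keys in b's order.
def cnlMerge {ν : Type} (combine : ν → ν → ν) (a b : List (String × ν)) : List (String × ν) :=
  -- first loop of Source B's _merge: a's keys, combined with b's value when shared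
  -- second loop: b's new keys, appended in b's order
  (b.foldl (fun out kv =>
      if (PySem.Dict.mk a).contains kv.1 then out else out.insert kv.1 kv.2)
    (a.foldl (fun out kv =>
      out.insert kv.1 (match (PySem.Dict.mk b).get? kv.1 with
        | some vb => combine kv.2 vb
        | none => kv.2)) PySem.Dict.empty)).items

def cnlMergeInner (a b : List (String × List Int)) : List (String × List Int) :=
  cnlMerge (fun x y => x ++ y) a b

def cnlMergeOuter (a b : List (String × List (String × List Int))) : List (String × List (String × List Int)) :=
  cnlMerge cnlMergeInner a b

def combine_nested_lists_alt (L1 : List (List (String × List (String × List Int)))) : List (String × List (String × List Int)) :=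
  L1.foldl (fun out d => cnlMergeOuter out d) []

-- ===== PRECONDITION & SPEC =====
-- Pre_ requires unique keys within each (outer and inner) association list: the lists encode
-- Python dicts, which cannot contain duplicate keys, so this excludes no Python-reachable input.
def Pre_combine_nested_lists (L1 : List (List (String × List (String × List Int)))) : Prop :=
  ∀ od ∈ L1, (od.map (·.1)).Nodup ∧ ∀ p ∈ od, (p.2.map (·.1)).Nodup
instance (L1 : List (List (String × List (String × List Int)))) : Decidable (Pre_combine_nested_lists L1) := by
  unfold Pre_combine_nested_lists; infer_instance

def pvWitness_combine_nested_lists : (List (List (String × List (String × List Int)))) :=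
  [[("a", [("x", [1])])], [("a", [("x", [2]), ("y", [])]), ("b", [])]]

def Spec_combine_nested_lists (L1 : List (List (String × List (String × List Int)))) (out : List (String × List (String × List Int))) : Prop := out = combine_nested_lists_alt L1
instance (L1 : List (List (String × List (String × List Int)))) (out : List (String × List (String × List Int))) : Decidable (Spec_combine_nested_lists L1 out) := by unfold Spec_combine_nested_lists; infer_instance

-- ===== CLAIM (what is proved, stated in full; the proofs are below) =====
def Claim_equal_combine_nested_lists : Prop := ∀ (L1 : List (List (String × List (String × List Int)))), Dom_combine_nested_lists L1 → Pre_combine_nested_lists L1 → Spec_combine_nested_lists L1 (combine_nested_lists L1)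

-- ===== LEMMAS AND PROOFS =====

-- Abbreviations for the two dict levels of A's accumulator.
abbrev CnlIDict := PySem.Dict String (List Int)
abbrev CnlODict := PySem.Dict String CnlIDict

-- A's inner-loop body, simplified to a single insert.
def cnlG (inner : CnlIDict) (q : String × List Int) : CnlIDict :=
  inner.insert q.1 (inner.getD q.1 [] ++ q.2)

def cnlInnerStep (v : CnlIDict) (c : List (String × List Int)) : CnlIDict :=
  c.foldl cnlG v

def cnlPairStep (cd : CnlODict) (p : String × List (String × List Int)) : CnlODict :=
  cd.insert p.1 (cnlInnerStep (cd.getD p.1 PySem.Dict.empty) p.2)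

def cnlToItems (cd : CnlODict) : List (String × List (String × List Int)) :=
  cd.items.map (fun r => (r.1, r.2.items))

lemma cnl_insert_getD_self {ν : Type} (d : PySem.Dict String ν) (k : String) (dflt : ν)
    (hnd : d.keys.Nodup) (hc : d.contains k = true) :
    d.insert k (d.getD k dflt) = d := by
  rcases hget : d.get? k with _ | v
  · rw [PySem.Dict.get?_eq_none_iff_not_mem_keys] at hget
    rw [PySem.Dict.contains_iff_mem_keys] at hc
    exact absurd hc hget
  · rw [PySem.Dict.getD_of_get?_eq_some d dflt hget]
    apply PySem.Dict.ext
    rw [PySem.Dict.items_insert_of_contains d v hc]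
    have hid : ∀ p ∈ d.items, (if (p.1 == k) = true then (k, v) else p) = p := by
      intro p hp
      split_ifs with hkey
      · have hk : p.1 = k := by simpa using hkey
        have hp2 : d.get? p.1 = some p.2 := PySem.Dict.get?_of_mem_items d (by simpa using hp) hnd
        rw [hk, hget] at hp2
        have : v = p.2 := by simpa using hp2
        rw [this, ← hk]
      · rfl
    rw [List.map_congr_left hid]
    exact List.map_id' d.items

lemma cnl_gEq (inner : CnlIDict) (q : String × List Int) :
    (if inner.contains q.1 then inner else inner.insert q.1 ([] : List Int)).modify q.1 []
        (fun l => l ++ q.2) = cnlG inner q := by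
  by_cases h : inner.contains q.1 = true
  · simp [h, PySem.Dict.modify, cnlG]
  · have h' : inner.contains q.1 = false := by simpa using h
    simp [h', PySem.Dict.modify, cnlG, PySem.Dict.getD_insert_self,
      PySem.Dict.insert_insert_self, PySem.Dict.getD_of_not_contains _ _ h']

lemma cnl_fold_fixed (p1 : String) (c : List (String × List Int)) :
    ∀ (cd : CnlODict), cd.keys.Nodup → cd.contains p1 = true →
      c.foldl (fun cd q => cd.insert p1 (cnlG (cd.getD p1 PySem.Dict.empty) q)) cd
        = cd.insert p1 (cnlInnerStep (cd.getD p1 PySem.Dict.empty) c) := by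
  induction c with
  | nil =>
    intro cd h hc
    simp only [List.foldl_nil, cnlInnerStep]
    exact (cnl_insert_getD_self cd p1 PySem.Dict.empty h hc).symm
  | cons q rest ih =>
    intro cd h hc
    simp only [List.foldl_cons]
    rw [ih (cd.insert p1 (cnlG (cd.getD p1 PySem.Dict.empty) q))
      (PySem.Dict.nodup_keys_insert _ _ _ h) (PySem.Dict.contains_insert_self _ _ _)]
    rw [PySem.Dict.getD_insert_self, PySem.Dict.insert_insert_self]
    simp [cnlInnerStep]

lemma cnl_pair_body (cd : CnlODict) (p : String × List (String × List Int)) (h : cd.keys.Nodup) :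
    (p.2.foldl (fun cd q =>
        let inner := cd.getD p.1 PySem.Dict.empty
        let inner := if inner.contains q.1 then inner else inner.insert q.1 ([] : List Int)
        cd.insert p.1 (inner.modify q.1 [] (fun l => l ++ q.2)))
      (if cd.contains p.1 then cd else cd.insert p.1 PySem.Dict.empty)) = cnlPairStep cd p := by
  have hstep : (fun (cd : CnlODict) (q : String × List Int) =>
      let inner := cd.getD p.1 PySem.Dict.empty
      let inner := if inner.contains q.1 then inner else inner.insert q.1 ([] : List Int)
      cd.insert p.1 (inner.modify q.1 [] (fun l => l ++ q.2)))
      = fun cd q => cd.insert p.1 (cnlG (cd.getD p.1 PySem.Dict.empty) q) := by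
    funext cd q
    simp only []
    rw [cnl_gEq]
  rw [hstep]
  rcases hc : cd.contains p.1 with _ | _
  · simp only [if_false, Bool.false_eq_true]
    rw [cnl_fold_fixed p.1 p.2 (cd.insert p.1 PySem.Dict.empty)
      (PySem.Dict.nodup_keys_insert _ _ _ h) (PySem.Dict.contains_insert_self _ _ _)]
    rw [PySem.Dict.getD_insert_self, PySem.Dict.insert_insert_self]
    unfold cnlPairStep
    rw [PySem.Dict.getD_of_not_contains _ _ hc]
  · simp only [if_true]
    exact cnl_fold_fixed p.1 p.2 cd h hc

lemma cnlMerge_nil_right {ν : Type} (combine : ν → ν → ν) (a : List (String × ν))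
    (ha : (a.map (·.1)).Nodup) : cnlMerge combine a [] = a := by
  unfold cnlMerge
  simp only [List.foldl_nil]
  rw [PySem.List.foldl_congr_mem a _
    (fun (out : PySem.Dict String ν) kv => out.insert kv.1 kv.2) PySem.Dict.empty
    (by intro out kv _; rfl)]
  rw [PySem.Dict.items_foldl_insert_fresh a (fun kv => kv.1) (fun kv => kv.2) PySem.Dict.empty
    (by intro x _; rfl) ha]
  have he : (PySem.Dict.empty : PySem.Dict String ν).items = [] := rfl
  simp [he]

lemma cnlMerge_nil_left {ν : Type} (combine : ν → ν → ν) (b : List (String × ν))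
    (hb : (b.map (·.1)).Nodup) : cnlMerge combine [] b = b := by
  unfold cnlMerge
  simp only [List.foldl_nil]
  rw [PySem.List.foldl_congr_mem b _
    (fun (out : PySem.Dict String ν) kv => out.insert kv.1 kv.2) PySem.Dict.empty
    (by intro out kv _; rfl)]
  rw [PySem.Dict.items_foldl_insert_fresh b (fun kv => kv.1) (fun kv => kv.2) PySem.Dict.empty
    (by intro x _; rfl) hb]
  have he : (PySem.Dict.empty : PySem.Dict String ν).items = [] := rfl
  simp [he]

lemma cnlMerge_absorb {ν : Type} (combine : ν → ν → ν) (a : List (String × ν))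
    (p : String × ν) (rest : List (String × ν))
    (_ha : (a.map (·.1)).Nodup) (hp : p.1 ∉ rest.map (·.1)) :
    cnlMerge combine a (p :: rest) =
      cnlMerge combine
        (if p.1 ∈ a.map (·.1) then a.map (fun q => if q.1 = p.1 then (q.1, combine q.2 p.2) else q)
         else a ++ [(p.1, p.2)]) rest := by
  obtain ⟨pk, pv⟩ := p
  dsimp only at hp ⊢
  have hgp : (PySem.Dict.mk ((pk, pv) :: rest)).get? pk = some pv := by
    rw [PySem.Dict.get?_mk_cons]; simp
  have hgr : ∀ x : String, x ≠ pk →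
      (PySem.Dict.mk ((pk, pv) :: rest)).get? x = (PySem.Dict.mk rest).get? x := by
    intro x hx; rw [PySem.Dict.get?_mk_cons]; simp [Ne.symm hx]
  have hrnone : (PySem.Dict.mk rest).get? pk = none := by
    rw [PySem.Dict.get?_eq_none_iff_not_mem_keys]; simpa [PySem.Dict.keys_mk] using hp
  have hne : ∀ kv ∈ rest, kv.1 ≠ pk := by
    intro kv hkv h
    exact hp (h ▸ List.mem_map_of_mem hkv)
  unfold cnlMerge
  by_cases hmem : pk ∈ a.map (·.1)
  · rw [if_pos hmem]
    have hca : (PySem.Dict.mk a).contains pk = true := by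
      rw [PySem.Dict.contains_iff_mem_keys]; simpa [PySem.Dict.keys_mk] using hmem
    have hanykeys : ∀ (l : List (String × ν)) (x : String),
        ((l.map (fun q => if q.1 = pk then (q.1, combine q.2 pv) else q)).any (fun r => r.1 == x))
          = l.any (fun r => r.1 == x) := by
      intro l x
      induction l with
      | nil => rfl
      | cons q r ih => by_cases hq1 : q.1 = pk <;> simp [hq1, ih]
    have hcont : ∀ x, (PySem.Dict.mk (a.map (fun q => if q.1 = pk then (q.1, combine q.2 pv) else q))).contains x
        = (PySem.Dict.mk a).contains x := by
      intro x
      rw [PySem.Dict.contains_mk, PySem.Dict.contains_mk, hanykeys]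
    have hinit : a.foldl (fun out kv => out.insert kv.1
          (match (PySem.Dict.mk ((pk, pv) :: rest)).get? kv.1 with
            | some vb => combine kv.2 vb | none => kv.2)) PySem.Dict.empty
        = (a.map (fun q => if q.1 = pk then (q.1, combine q.2 pv) else q)).foldl
            (fun out kv => out.insert kv.1
              (match (PySem.Dict.mk rest).get? kv.1 with
                | some vb => combine kv.2 vb | none => kv.2)) PySem.Dict.empty := by
      rw [List.foldl_map]
      apply PySem.List.foldl_congr_mem
      intro out q hq
      by_cases hq1 : q.1 = pk
      · simp [hq1, hgp, hrnone]
      · simp [hq1, hgr q.1 hq1]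
    rw [List.foldl_cons]
    simp only [hca, if_true]
    rw [hinit]
    exact congrArg PySem.Dict.items
      (PySem.List.foldl_congr_mem rest _ _ _ (fun out kv _ => by rw [hcont kv.1]))
  · rw [if_neg hmem]
    have hca : (PySem.Dict.mk a).contains pk = false := by
      rw [PySem.Dict.contains_eq_decide_mem_keys]
      simp only [PySem.Dict.keys_mk]
      simpa using hmem
    have haq : ∀ q ∈ a, q.1 ≠ pk := by
      intro q hq h
      exact hmem (h ▸ List.mem_map_of_mem hq)
    have hinit : a.foldl (fun out kv => out.insert kv.1
          (match (PySem.Dict.mk ((pk, pv) :: rest)).get? kv.1 with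
            | some vb => combine kv.2 vb | none => kv.2)) PySem.Dict.empty
        = a.foldl (fun out kv => out.insert kv.1
            (match (PySem.Dict.mk rest).get? kv.1 with
              | some vb => combine kv.2 vb | none => kv.2)) PySem.Dict.empty :=
      PySem.List.foldl_congr_mem _ _ _ _ (fun out q hq => by rw [hgr q.1 (haq q hq)])
    have hcont2 : ∀ kv ∈ rest, (PySem.Dict.mk (a ++ [(pk, pv)])).contains kv.1
        = (PySem.Dict.mk a).contains kv.1 := by
      intro kv hkv
      rw [PySem.Dict.contains_mk, PySem.Dict.contains_mk, List.any_append]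
      have h1 : (([(pk, pv)] : List (String × ν)).any fun p => p.1 == kv.1) = false := by
        simp [Ne.symm (hne kv hkv)]
      rw [h1, Bool.or_false]
    rw [List.foldl_cons]
    simp only [hca, Bool.false_eq_true, if_false]
    rw [List.foldl_append, List.foldl_cons, List.foldl_nil, hinit, hrnone]
    exact congrArg PySem.Dict.items
      (PySem.List.foldl_congr_mem rest _ _ _ (fun out kv hkv => by rw [hcont2 kv hkv]))

lemma cnl_generic {ν μ : Type} (r : ν → μ) (F : ν → μ → ν) (combine : μ → μ → μ) (dflt : ν)
    (Q : ν → Prop) (P : μ → Prop) (hQd : Q dflt)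
    (hH1 : ∀ v c, Q v → P c → combine (r v) c = r (F v c))
    (hH2 : ∀ c, P c → r (F dflt c) = c)
    (hQF : ∀ v c, Q v → P c → Q (F v c)) :
    ∀ (b : List (String × μ)) (d : PySem.Dict String ν),
      d.keys.Nodup → (∀ v ∈ d.values, Q v) → (b.map (·.1)).Nodup → (∀ q ∈ b, P q.2) →
      (b.foldl (fun d p => d.insert p.1 (F (d.getD p.1 dflt) p.2)) d).items.map (fun x => (x.1, r x.2))
        = cnlMerge combine (d.items.map (fun x => (x.1, r x.2))) b := by
  have hmapkeys : ∀ (d : PySem.Dict String ν),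
      ((d.items.map (fun x => (x.1, r x.2))).map (·.1)) = d.keys := by
    intro d; rw [List.map_map]; simp only [PySem.Dict.keys]; rfl
  intro b
  induction b with
  | nil =>
    intro d hd _ _ _
    rw [List.foldl_nil, cnlMerge_nil_right _ _ (by rw [hmapkeys]; exact hd)]
  | cons p rest ih =>
    intro d hd hQ hb hP
    simp only [List.map_cons] at hb
    have hpnot : p.1 ∉ rest.map (·.1) := (List.nodup_cons.mp hb).1
    have hb' : (rest.map (·.1)).Nodup := (List.nodup_cons.mp hb).2
    have hPp : P p.2 := hP p List.mem_cons_self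
    have hQgd : Q (d.getD p.1 dflt) := by
      rcases hg : d.get? p.1 with _ | v
      · rw [PySem.Dict.getD_of_get?_eq_none _ _ hg]; exact hQd
      · rw [PySem.Dict.getD_of_get?_eq_some _ _ hg]
        apply hQ
        have hmem := PySem.Dict.mem_items_of_get?_eq_some d hg
        simp only [PySem.Dict.values]
        exact List.mem_map_of_mem hmem
    have hQw : Q (F (d.getD p.1 dflt) p.2) := hQF _ _ hQgd hPp
    rw [List.foldl_cons]
    rw [ih (d.insert p.1 (F (d.getD p.1 dflt) p.2)) (PySem.Dict.nodup_keys_insert _ _ _ hd)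
      (fun v hv => by
        rcases PySem.Dict.mem_values_insert _ _ _ _ hv with h | h
        exacts [h ▸ hQw, hQ v h])
      hb' (fun q hq => hP q (List.mem_cons_of_mem _ hq))]
    rw [cnlMerge_absorb combine _ p rest (by rw [hmapkeys]; exact hd) hpnot]
    congr 1
    by_cases hc : d.contains p.1 = true
    · have hmem : p.1 ∈ (d.items.map (fun x => (x.1, r x.2))).map (·.1) := by
        rw [hmapkeys]; exact (PySem.Dict.contains_iff_mem_keys _ _).mp hc
      rw [if_pos hmem, PySem.Dict.items_insert_of_contains d _ hc, List.map_map, List.map_map]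
      apply List.map_congr_left
      intro x hx
      by_cases hx1 : x.1 = p.1
      · have hxmem : (p.1, x.2) ∈ d.items := by rw [← hx1]; simpa using hx
        have hgd : d.getD p.1 dflt = x.2 := PySem.Dict.getD_of_mem_items d hxmem hd dflt
        have hQx : Q x.2 := hQ x.2 (by simp only [PySem.Dict.values]; exact List.mem_map_of_mem hx)
        simp [Function.comp, hx1, hgd, ← hH1 x.2 p.2 hQx hPp]
      · simp [Function.comp, hx1]
    · have hcf : d.contains p.1 = false := by simpa using hc
      have hmem : p.1 ∉ (d.items.map (fun x => (x.1, r x.2))).map (·.1) := by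
        rw [hmapkeys]; intro hk; exact hc ((PySem.Dict.contains_iff_mem_keys _ _).mpr hk)
      rw [if_neg hmem, PySem.Dict.items_insert_of_not_contains d _ hcf, List.map_append]
      rw [PySem.Dict.getD_of_not_contains _ _ hcf]
      simp [hH2 p.2 hPp]

lemma cnl_inner_items (v : CnlIDict) (hv : v.keys.Nodup) (c : List (String × List Int))
    (hc : (c.map (·.1)).Nodup) :
    (cnlInnerStep v c).items = cnlMergeInner v.items c := by
  have h := cnl_generic (ν := List Int) (μ := List Int) (fun x => x) (fun v c => v ++ c)
    (fun x y => x ++ y) [] (fun _ => True) (fun _ => True) trivial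
    (fun _ _ _ _ => rfl) (fun _ _ => rfl) (fun _ _ _ _ => trivial)
    c v hv (fun _ _ => trivial) hc (fun _ _ => trivial)
  simpa [cnlInnerStep, cnlG, cnlMergeInner] using h

lemma cnl_inner_nodup (v : CnlIDict) (hv : v.keys.Nodup) (c : List (String × List Int)) :
    (cnlInnerStep v c).keys.Nodup := by
  exact PySem.Dict.nodup_keys_foldl_insert_key c (fun q => q.1)
    (fun d q => d.getD q.1 [] ++ q.2) v hv

lemma cnl_outer_items (cd : CnlODict) (h1 : cd.keys.Nodup)
    (h2 : ∀ v ∈ cd.values, v.keys.Nodup) (od : List (String × List (String × List Int)))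
    (ho1 : (od.map (·.1)).Nodup) (ho2 : ∀ p ∈ od, (p.2.map (·.1)).Nodup) :
    cnlToItems (od.foldl cnlPairStep cd) = cnlMergeOuter (cnlToItems cd) od := by
  have hH2 : ∀ c : List (String × List Int), (c.map (·.1)).Nodup →
      (cnlInnerStep PySem.Dict.empty c).items = c := by
    intro c hc
    rw [cnl_inner_items PySem.Dict.empty (by decide) c hc]
    have he : (PySem.Dict.empty : CnlIDict).items = [] := rfl
    rw [cnlMergeInner, he, cnlMerge_nil_left _ _ hc]
  have h := cnl_generic (ν := CnlIDict) (μ := List (String × List Int))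
    (fun v => v.items) cnlInnerStep cnlMergeInner PySem.Dict.empty
    (fun v => v.keys.Nodup) (fun c => (c.map (·.1)).Nodup) (by decide)
    (fun v c hv hc => (cnl_inner_items v hv c hc).symm)
    hH2
    (fun v c hv _ => cnl_inner_nodup v hv c)
    od cd h1 h2 ho1 ho2
  simpa [cnlToItems, cnlMergeOuter, cnlPairStep] using h

lemma cnl_outer_keys_nodup (od : List (String × List (String × List Int))) (cd : CnlODict)
    (h1 : cd.keys.Nodup) : (od.foldl cnlPairStep cd).keys.Nodup := by
  exact PySem.Dict.nodup_keys_foldl_insert_key od (fun p => p.1)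
    (fun cd p => cnlInnerStep (cd.getD p.1 PySem.Dict.empty) p.2) cd h1

lemma cnl_outer_values_nodup (od : List (String × List (String × List Int))) :
    ∀ (cd : CnlODict), (∀ v ∈ cd.values, v.keys.Nodup) →
      ∀ v ∈ (od.foldl cnlPairStep cd).values, v.keys.Nodup := by
  induction od with
  | nil => intro cd hQ; simpa using hQ
  | cons p rest ih =>
    intro cd hQ
    rw [List.foldl_cons]
    apply ih
    intro v hv
    rcases PySem.Dict.mem_values_insert _ _ _ _ hv with h | h
    · subst h
      apply cnl_inner_nodup
      rcases hg : cd.get? p.1 with _ | u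
      · rw [PySem.Dict.getD_of_get?_eq_none _ _ hg]; decide
      · rw [PySem.Dict.getD_of_get?_eq_some _ _ hg]
        exact hQ u (by simp only [PySem.Dict.values]
                       exact List.mem_map_of_mem (PySem.Dict.mem_items_of_get?_eq_some cd hg))
    · exact hQ v h

lemma cnl_od_fold (od : List (String × List (String × List Int))) :
    ∀ (cd : CnlODict), cd.keys.Nodup →
      od.foldl (fun cd p =>
          let cd := if cd.contains p.1 then cd else cd.insert p.1 PySem.Dict.empty
          p.2.foldl (fun cd q =>
            let inner := cd.getD p.1 PySem.Dict.empty
            let inner := if inner.contains q.1 then inner else inner.insert q.1 ([] : List Int)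
            cd.insert p.1 (inner.modify q.1 [] (fun l => l ++ q.2))) cd) cd
        = od.foldl cnlPairStep cd := by
  induction od with
  | nil => intro cd _; rfl
  | cons p rest ih =>
    intro cd h
    simp only [List.foldl_cons]
    rw [cnl_pair_body cd p h]
    exact ih (cnlPairStep cd p) (PySem.Dict.nodup_keys_insert _ _ _ h)

lemma cnl_main (L1 : List (List (String × List (String × List Int)))) :
    ∀ (cd : CnlODict), cd.keys.Nodup → (∀ v ∈ cd.values, v.keys.Nodup) →
      Pre_combine_nested_lists L1 →
      cnlToItems (L1.foldl (fun cd od =>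
          od.foldl (fun cd p =>
            let cd := if cd.contains p.1 then cd else cd.insert p.1 PySem.Dict.empty
            p.2.foldl (fun cd q =>
              let inner := cd.getD p.1 PySem.Dict.empty
              let inner := if inner.contains q.1 then inner else inner.insert q.1 ([] : List Int)
              cd.insert p.1 (inner.modify q.1 [] (fun l => l ++ q.2))) cd) cd) cd)
        = L1.foldl cnlMergeOuter (cnlToItems cd) := by
  induction L1 with
  | nil => intro cd _ _ _; rfl
  | cons od rest ih =>
    intro cd h1 h2 hpre
    have hod := hpre od List.mem_cons_self
    simp only [List.foldl_cons]
    rw [cnl_od_fold od cd h1]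
    rw [ih (od.foldl cnlPairStep cd) (cnl_outer_keys_nodup od cd h1)
      (cnl_outer_values_nodup od cd h2)
      (fun od' hod' => hpre od' (List.mem_cons_of_mem _ hod'))]
    rw [cnl_outer_items cd h1 h2 od hod.1 hod.2]

-- ===== VERDICT (by name: the statement is the Claim_ definition above) =====
theorem combine_nested_lists_spec : Claim_equal_combine_nested_lists := by
  intro L1 _ hpre
  unfold Spec_combine_nested_lists combine_nested_lists combine_nested_lists_alt
  have h := cnl_main L1 PySem.Dict.empty (by decide) (by decide) hpre
  exact h
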